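-- pv_equiv track=rewrite | github.com/99change/Triton_insrt | tri_ins/sanitizer.py | _get_merge_list
-- ===== SOURCE A (Python) =====
-- from typing import Dict, List, Set, Tuple
--
-- def _get_merge_list(connections: Set[Tuple[int, int]],
--                     loc_map: Dict[str, int]) -> List[Tuple[int, int]]:
--     """Find probe pairs that can be merged (unique 1:1 connection, same loc)."""
--     merged = []
--     for connection in connections:
--         from_index = connection[0]
--         to_index = connection[1]
--         is_unique_from = sum(1 for c in connections if c[0] == from_index) == 1
--         is_unique_to = sum(1 for c in connections if c[1] == to_index) == 1
--         if is_unique_from and is_unique_to: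
--             from_loc = loc_map.get(str(from_index), None)
--             to_loc = loc_map.get(str(to_index), None)
--             if from_loc == to_loc:
--                 merged.append(connection)
--     return merged
-- ===== SOURCE B (Python) =====
-- from typing import Dict, List, Set, Tuple
--
-- def _get_merge_list(connections: Set[Tuple[int, int]],
--                     loc_map: Dict[str, int]) -> List[Tuple[int, int]]:
--     """Bucket connections by source once, count targets once, then walk the
--     buckets: a singleton bucket whose target is also unique and whose two
--     endpoints map to the same location is merged."""
--     from_groups = {}
--     to_counts = {}
--     for conn in connections:
--         from_groups.setdefault(conn[0], []).append(conn)
--         to_counts[conn[1]] = to_counts.get(conn[1], 0) + 1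
--     merged = []
--     for group in from_groups.values():
--         if len(group) == 1:
--             conn = group[0]
--             if to_counts[conn[1]] == 1 and \
--                     loc_map.get(str(conn[0])) == loc_map.get(str(conn[1])):
--                 merged.append(conn)
--     return merged
-- ===== Notes on version B (the rewrite author's own statement) =====
-- stated objective: alternative
-- what changed: Instead of rescanning the connection set twice for every element, B builds source-keyed buckets and a target counter in one indexing pass and then walks the buckets, emitting the single connection of each singleton bucket whose target is also unique and whose endpoints share a location.
import Mathlib
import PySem

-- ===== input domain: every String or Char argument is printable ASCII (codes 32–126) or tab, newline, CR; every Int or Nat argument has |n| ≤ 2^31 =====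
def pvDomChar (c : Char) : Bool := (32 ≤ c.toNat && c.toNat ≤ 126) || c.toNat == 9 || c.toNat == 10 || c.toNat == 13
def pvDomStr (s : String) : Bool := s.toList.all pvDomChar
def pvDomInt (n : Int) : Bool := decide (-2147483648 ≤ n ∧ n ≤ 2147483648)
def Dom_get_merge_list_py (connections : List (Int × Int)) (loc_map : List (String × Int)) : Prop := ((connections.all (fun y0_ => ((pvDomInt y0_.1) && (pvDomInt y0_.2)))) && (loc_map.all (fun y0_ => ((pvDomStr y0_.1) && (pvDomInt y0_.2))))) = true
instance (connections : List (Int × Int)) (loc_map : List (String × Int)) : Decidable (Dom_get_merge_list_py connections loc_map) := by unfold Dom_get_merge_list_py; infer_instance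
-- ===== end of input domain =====

-- B indexes the connections once into source-keyed buckets plus a target counter and
-- then walks the buckets, instead of A's two inner scans per connection (objective: alternative).
-- The set's iteration order is modelled as the order of the given list.

-- ===== PORT A =====
def get_merge_list_py (connections : List (Int × Int)) (loc_map : List (String × Int)) : List (Int × Int) :=
  connections.foldl (fun merged connection =>
    let from_index := connection.1
    let to_index := connection.2
    let is_unique_from : Prop :=
      (connections.foldl (fun s c => if c.1 = from_index then s + 1 else s) (0 : Int)) = 1
    let is_unique_to : Prop :=
      (connections.foldl (fun s c => if c.2 = to_index then s + 1 else s) (0 : Int)) = 1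
    if is_unique_from ∧ is_unique_to then
      let from_loc := PySem.Dict.get? (PySem.Dict.mk loc_map) (PySem.Int.toStr from_index)
      let to_loc := PySem.Dict.get? (PySem.Dict.mk loc_map) (PySem.Int.toStr to_index)
      if from_loc = to_loc then merged ++ [connection] else merged
    else merged) []

-- ===== PORT B =====
-- 'from_groups.setdefault(conn[0], []).append(conn)' is exactly
-- 'from_groups[conn[0]] = from_groups.get(conn[0], []) + [conn]', i.e. Dict.modify;
-- 'to_counts[conn[1]]' in the second loop always finds its key (conn came from connections),
-- so Dict.getD … 0 is exact there.
def get_merge_list_py_alt (connections : List (Int × Int)) (loc_map : List (String × Int)) : List (Int × Int) :=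
  let st := connections.foldl
    (fun (st : PySem.Dict Int (List (Int × Int)) × PySem.Dict Int Int) conn =>
      (PySem.Dict.modify st.1 conn.1 [] (fun g => g ++ [conn]),
       PySem.Dict.insert st.2 conn.2 (PySem.Dict.getD st.2 conn.2 0 + 1)))
    (PySem.Dict.empty, PySem.Dict.empty)
  let from_groups := st.1
  let to_counts := st.2
  (PySem.Dict.values from_groups).foldl (fun merged group =>
    match group with
    | [conn] =>
        if PySem.Dict.getD to_counts conn.2 0 = 1 ∧
           PySem.Dict.get? (PySem.Dict.mk loc_map) (PySem.Int.toStr conn.1)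
             = PySem.Dict.get? (PySem.Dict.mk loc_map) (PySem.Int.toStr conn.2)
        then merged ++ [conn] else merged
    | _ => merged) []

-- ===== PRECONDITION & SPEC =====
def Spec_get_merge_list_py (connections : List (Int × Int)) (loc_map : List (String × Int)) (out : List (Int × Int)) : Prop := out = get_merge_list_py_alt connections loc_map
instance (connections : List (Int × Int)) (loc_map : List (String × Int)) (out : List (Int × Int)) : Decidable (Spec_get_merge_list_py connections loc_map out) := by unfold Spec_get_merge_list_py; infer_instance

-- ===== CLAIM (what is proved, stated in full; the proofs are below) =====
def Claim_equal_get_merge_list_py : Prop := ∀ (connections : List (Int × Int)) (loc_map : List (String × Int)), Dom_get_merge_list_py connections loc_map → Spec_get_merge_list_py connections loc_map (get_merge_list_py connections loc_map)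

-- ===== LEMMAS AND PROOFS =====

-- What B emits for the bucket of source key k (q bundles the target-count and location tests).
def pvEmit (l : List (Int × Int)) (q : (Int × Int) → Bool) (k : Int) : List (Int × Int) :=
  match l.filter (fun c => c.1 == k) with
  | [c] => if q c then [c] else []
  | _ => []

-- A's inner counting scan counts the matching elements.
theorem pv_scan_count (l : List (Int × Int)) (f : (Int × Int) → Int) (v : Int) :
    l.foldl (fun s c => if f c = v then s + 1 else s) (0 : Int)
      = (l.countP (fun c => f c == v) : Int) := by
  simpa using PySem.List.foldl_ite_add_one (l := l) (p := fun c => f c = v) (a := (0 : Int))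

theorem pv_discard_ofList (ys : List Int) (k : Int) :
    (PySem.Set.ofList ys).discard k
      = PySem.Set.ofList (ys.filter (fun y => !(y == k))) := by
  induction ys with
  | nil => rfl
  | cons y t ih =>
    rw [PySem.Set.ofList_cons]
    by_cases hy : y = k
    · subst hy
      rw [List.filter_cons_of_neg (by simp)]
      rw [← ih]
      simp [PySem.Set.discard, List.filter_filter]
    · rw [List.filter_cons_of_pos (by simp [hy]), PySem.Set.ofList_cons, ← ih]
      simp only [PySem.Set.discard, List.filter_cons]
      rw [if_pos (by simp [hy])]
      rw [List.filter_filter, List.filter_filter]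
      congr 1
      apply List.filter_congr
      intro x _
      cases hxk : x == k <;> cases hxy : x == y <;> simp_all

-- Walking the source buckets in first-occurrence order and emitting the singleton
-- buckets is the same as filtering the list by "source occurs once".
theorem pv_group_filter (q : (Int × Int) → Bool) :
    ∀ (n : Nat) (l : List (Int × Int)), l.length ≤ n →
    (PySem.Set.ofList (l.map (fun c => c.1))).flatMap (pvEmit l q)
      = l.filter (fun c => decide (l.countP (fun x => x.1 == c.1) = 1) && q c) := by
  intro n
  induction n with
  | zero =>
    intro l hl
    have : l = [] := List.eq_nil_of_length_eq_zero (Nat.le_zero.mp hl)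
    subst this; rfl
  | succ n ih =>
    intro l hl
    match l with
    | [] => rfl
    | c :: t =>
      -- the tail with the head's source key removed
      set l' : List (Int × Int) := t.filter (fun x => !(x.1 == c.1)) with hl'
      have hlen : l'.length ≤ n := by
        rw [hl']
        have := List.length_filter_le (fun x => !(x.1 == c.1)) t
        simp at hl; omega
      -- (F1) key list decomposition
      have hkeys : PySem.Set.ofList ((c :: t).map (fun x => x.1))
          = c.1 :: PySem.Set.ofList (l'.map (fun x => x.1)) := by
        rw [List.map_cons, PySem.Set.ofList_cons, pv_discard_ofList, hl', List.filter_map]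
        rfl
      rw [hkeys, List.flatMap_cons]
      -- (F4) emissions for other keys only look at l'
      have hrest : (PySem.Set.ofList (l'.map (fun x => x.1))).flatMap (pvEmit (c :: t) q)
          = (PySem.Set.ofList (l'.map (fun x => x.1))).flatMap (pvEmit l' q) := by
        apply List.flatMap_congr
        intro k hk
        have hkne : k ≠ c.1 := by
          have : k ∈ l'.map (fun x => x.1) := (PySem.Set.mem_ofList _ _).mp hk
          obtain ⟨x, hx, rfl⟩ := List.mem_map.mp this
          have := List.of_mem_filter hx
          simpa using this
        unfold pvEmit
        have : (c :: t).filter (fun x => x.1 == k) = l'.filter (fun x => x.1 == k) := by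
          rw [List.filter_cons_of_neg (by simp [Ne.symm hkne]), hl', List.filter_filter]
          apply List.filter_congr
          intro x _
          cases hxk : x.1 == k <;> simp_all
        rw [this]
      rw [hrest, ih l' hlen]
      -- (F3) head emission
      have hhead : pvEmit (c :: t) q c.1
          = if (c :: t).countP (fun x => x.1 == c.1) = 1 ∧ q c = true then [c] else [] := by
        unfold pvEmit
        rw [List.filter_cons_of_pos (by simp)]
        rw [List.countP_cons_of_pos (by simp)]
        cases htf : t.filter (fun x => x.1 == c.1) with
        | nil =>
          have : t.countP (fun x => x.1 == c.1) = 0 := by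
            rw [List.countP_eq_length_filter, htf]; rfl
          simp [this]
        | cons a r =>
          have : 1 ≤ t.countP (fun x => x.1 == c.1) := by
            rw [List.countP_eq_length_filter, htf]; simp
          simp only []
          rw [if_neg (by omega)]
      -- (F5)/(F6) RHS decomposition
      rw [List.filter_cons]
      have hPc : (decide ((c :: t).countP (fun x => x.1 == c.1) = 1) && q c)
          = decide ((c :: t).countP (fun x => x.1 == c.1) = 1 ∧ q c = true) := by
        cases hq : q c <;> simp
      have hF6 : t.filter (fun x => decide ((c :: t).countP (fun y => y.1 == x.1) = 1) && q x)
          = l'.filter (fun x => decide (l'.countP (fun y => y.1 == x.1) = 1) && q x) := by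
        have h1 : t.filter (fun x => decide ((c :: t).countP (fun y => y.1 == x.1) = 1) && q x)
            = l'.filter (fun x => decide ((c :: t).countP (fun y => y.1 == x.1) = 1) && q x) := by
          rw [hl', List.filter_filter]
          apply List.filter_congr
          intro x hx
          cases hxc : x.1 == c.1
          · simp
          · have hx1 : x.1 = c.1 := by simpa using hxc
            have hcnt : 1 ≤ t.countP (fun y => y.1 == x.1) :=
              List.countP_pos_iff.mpr ⟨x, hx, by simp⟩
            have h2 : (c :: t).countP (fun y => y.1 == x.1) = t.countP (fun y => y.1 == x.1) + 1 :=
              List.countP_cons_of_pos (by simp [hx1])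
            have h3 : decide ((c :: t).countP (fun y => y.1 == x.1) = 1) = false := by
              rw [h2]
              simp only [decide_eq_false_iff_not]
              omega
            simp [h3]
        rw [h1]
        apply List.filter_congr
        intro x hx
        have hxc : x.1 ≠ c.1 := by
          have := List.of_mem_filter hx
          simpa using this
        have hc1 : (c :: t).countP (fun y => y.1 == x.1) = t.countP (fun y => y.1 == x.1) :=
          List.countP_cons_of_neg (by simp [Ne.symm hxc])
        have hc2 : l'.countP (fun y => y.1 == x.1) = t.countP (fun y => y.1 == x.1) := by
          rw [hl', List.countP_filter]
          congr 1
          funext y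
          cases hyx : y.1 == x.1
          · rfl
          · have : y.1 = x.1 := by simpa using hyx
            simp [this, hxc]
        rw [hc1, hc2]
      rw [hF6, hhead]
      by_cases hP : (c :: t).countP (fun x => x.1 == c.1) = 1 ∧ q c = true
      · rw [if_pos hP, if_pos (by rw [hPc]; exact decide_eq_true hP)]
        rfl
      · rw [if_neg hP, if_neg (by rw [hPc]; simpa using hP)]
        rfl

-- ===== VERDICT (by name: the statement is the Claim_ definition above) =====
-- B's target counter looks up the count of c.2.
theorem pv_to_counts (connections : List (Int × Int)) (v : Int) :
    (connections.foldl
        (fun (d : PySem.Dict Int Int) conn => d.insert conn.2 (d.getD conn.2 0 + 1))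
        PySem.Dict.empty).getD v 0
      = (connections.countP (fun x => x.2 == v) : Int) := by
  have h : connections.foldl
        (fun (d : PySem.Dict Int Int) conn => d.insert conn.2 (d.getD conn.2 0 + 1))
        PySem.Dict.empty
      = (connections.map (fun c => c.2)).foldl
        (fun (d : PySem.Dict Int Int) x => d.insert x (d.getD x 0 + 1)) PySem.Dict.empty := by
    rw [List.foldl_map]
  rw [h, PySem.Dict.getD_foldl_insert_add_one]
  simp [List.count, List.countP_map, Function.comp_def]

-- B's source buckets: the bucket of key k is the sublist of connections with source k.
theorem pv_from_groups_getD (connections : List (Int × Int)) (k : Int) :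
    (connections.foldl
        (fun (d : PySem.Dict Int (List (Int × Int))) conn =>
          d.modify conn.1 [] (fun g => g ++ [conn]))
        PySem.Dict.empty).getD k []
      = connections.filter (fun c => c.1 == k) := by
  have h : connections.foldl
        (fun (d : PySem.Dict Int (List (Int × Int))) conn =>
          d.modify conn.1 [] (fun g => g ++ [conn]))
        PySem.Dict.empty
      = (connections.map (fun c => (c.1, c))).foldl
        (fun (d : PySem.Dict Int (List (Int × Int))) p =>
          d.modify p.1 [] (fun g => g ++ [p.2])) PySem.Dict.empty := by
    rw [List.foldl_map]
  rw [h, PySem.Dict.getD_foldl_modify_append]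
  simp [List.filter_map, List.map_map, Function.comp_def]

-- ===== VERDICT (by name: the statement is the Claim_ definition above) =====
theorem get_merge_list_py_spec : Claim_equal_get_merge_list_py := by
  intro connections loc_map _
  unfold Spec_get_merge_list_py get_merge_list_py get_merge_list_py_alt
  -- the bundled target-count and location test, fixed throughout B's bucket walk
  set q : (Int × Int) → Bool := fun c =>
    decide (((connections.countP (fun x => x.2 == c.2) : Int) = 1) ∧
      PySem.Dict.get? (PySem.Dict.mk loc_map) (PySem.Int.toStr c.1)
        = PySem.Dict.get? (PySem.Dict.mk loc_map) (PySem.Int.toStr c.2)) with hq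
  -- ---- A's side: one filter over connections ----
  have hA : connections.foldl (fun merged connection =>
      let from_index := connection.1
      let to_index := connection.2
      let is_unique_from : Prop :=
        (connections.foldl (fun s c => if c.1 = from_index then s + 1 else s) (0 : Int)) = 1
      let is_unique_to : Prop :=
        (connections.foldl (fun s c => if c.2 = to_index then s + 1 else s) (0 : Int)) = 1
      if is_unique_from ∧ is_unique_to then
        let from_loc := PySem.Dict.get? (PySem.Dict.mk loc_map) (PySem.Int.toStr from_index)
        let to_loc := PySem.Dict.get? (PySem.Dict.mk loc_map) (PySem.Int.toStr to_index)
        if from_loc = to_loc then merged ++ [connection] else merged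
      else merged) []
      = connections.filter (fun c =>
          decide (connections.countP (fun x => x.1 == c.1) = 1) && q c) := by
    refine (PySem.List.foldl_congr_mem' connections _
        (fun acc c =>
          if ((connections.countP (fun x => x.1 == c.1) : Int) = 1
              ∧ (connections.countP (fun x => x.2 == c.2) : Int) = 1
              ∧ PySem.Dict.get? (PySem.Dict.mk loc_map) (PySem.Int.toStr c.1)
                  = PySem.Dict.get? (PySem.Dict.mk loc_map) (PySem.Int.toStr c.2))
            then acc ++ [c] else acc) []
        ?_).trans ?_
    · intro c _ acc
      simp only [pv_scan_count]
      split_ifs <;> tauto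
    · rw [PySem.List.foldl_append_ite_eq_filter, List.nil_append]
      apply List.filter_congr
      intro c _
      have hcast : ((connections.countP (fun x => x.1 == c.1) : Int) = 1)
          ↔ (connections.countP (fun x => x.1 == c.1) = 1) := by exact_mod_cast Iff.rfl
      rw [hq]
      rw [show (decide ((connections.countP (fun x => x.1 == c.1) : Int) = 1
            ∧ (connections.countP (fun x => x.2 == c.2) : Int) = 1
            ∧ PySem.Dict.get? (PySem.Dict.mk loc_map) (PySem.Int.toStr c.1)
                = PySem.Dict.get? (PySem.Dict.mk loc_map) (PySem.Int.toStr c.2)))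
          = decide ((connections.countP (fun x => x.1 == c.1) = 1)
            ∧ ((connections.countP (fun x => x.2 == c.2) : Int) = 1
              ∧ PySem.Dict.get? (PySem.Dict.mk loc_map) (PySem.Int.toStr c.1)
                  = PySem.Dict.get? (PySem.Dict.mk loc_map) (PySem.Int.toStr c.2)))
          from decide_eq_decide.mpr (by rw [hcast])]
      rw [Bool.decide_and]
  rw [hA]
  -- ---- B's side: split the pair fold, expose buckets and counter ----
  simp only []
  set G := connections.foldl
    (fun (d : PySem.Dict Int (List (Int × Int))) conn =>
      d.modify conn.1 [] (fun g => g ++ [conn])) PySem.Dict.empty with hG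
  set T := connections.foldl
    (fun (d : PySem.Dict Int Int) conn => d.insert conn.2 (d.getD conn.2 0 + 1))
    PySem.Dict.empty with hT
  have hc : connections.foldl
      (fun (st : PySem.Dict Int (List (Int × Int)) × PySem.Dict Int Int) conn =>
        (PySem.Dict.modify st.1 conn.1 [] (fun g => g ++ [conn]),
         PySem.Dict.insert st.2 conn.2 (PySem.Dict.getD st.2 conn.2 0 + 1)))
      (PySem.Dict.empty, PySem.Dict.empty) = (G, T) :=
    PySem.List.foldl_prod_mk
      (f := fun (d : PySem.Dict Int (List (Int × Int))) conn =>
        d.modify conn.1 [] (fun g => g ++ [conn]))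
      (g := fun (d : PySem.Dict Int Int) conn => d.insert conn.2 (d.getD conn.2 0 + 1))
      (l := connections) (a := PySem.Dict.empty) (b := PySem.Dict.empty)
  rw [hc]
  dsimp only
  have hkeys : G.keys = PySem.Set.ofList (connections.map (fun c => c.1)) := by
    rw [hG, PySem.Dict.keys_foldl_modify_key connections (fun conn => conn.1) []
      (fun _ conn => fun g => g ++ [conn]) PySem.Dict.empty]
    rw [PySem.Dict.keys_empty, PySem.Set.update_nil_left]
  have hnodup : G.keys.Nodup := by
    rw [hkeys]; exact PySem.Set.nodup_ofList _
  have hvalues := PySem.Dict.values_eq_map_keys G hnodup []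
  rw [hvalues, List.foldl_map, hkeys]
  -- each bucket step is an emission
  rw [PySem.List.foldl_congr_mem (PySem.Set.ofList (connections.map (fun c => c.1))) _
    (fun acc k => acc ++ pvEmit connections q k) []
    (by
      intro acc k _
      simp only [hG, hT, pv_from_groups_getD, pv_to_counts, pvEmit]
      cases hfk : connections.filter (fun c => c.1 == k) with
      | nil => simp
      | cons c r =>
        cases r with
        | cons c' r' => simp
        | nil =>
          simp only []
          by_cases h : ((connections.countP (fun x => x.2 == c.2) = 1)
              ∧ PySem.Dict.get? (PySem.Dict.mk loc_map) (PySem.Int.toStr c.1)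
                  = PySem.Dict.get? (PySem.Dict.mk loc_map) (PySem.Int.toStr c.2))
          · simp [hq, h]
          · simp [hq, h])]
  rw [PySem.List.foldl_append_eq_flatMap, List.nil_append]
  rw [pv_group_filter q connections.length connections (Nat.le_refl _)]
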